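-- pv_equiv track=rewrite | github.com/KotisKotlyandii/lessons1 | ege22/87.py | f
-- ===== SOURCE A (Python) =====
-- def f(x):
--     a,b,i,c = 0,0,0,0
--     while x > 0:
--         i += 1
--         if i % 2 == 0:
--             a += c
--         else:
--             b += c
--         c = x % 10
--         x //= 10
--     return a,b
-- ===== SOURCE B (Python) =====
-- def f(x):
--     if x < 10:
--         return (0, 0)
--     if x < 100:
--         return (x % 10, 0)
--     a, b = f(x // 100)
--     return (a + x % 10, b + x // 10 % 10)
-- ===== Notes on version B (the rewrite author's own statement) =====
-- stated objective: alternative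
-- what changed: A's single streaming while-loop with a step counter i and a one-step-lag accumulator c is replaced by a direct recursion that strips two decimal digits per step and adds them straight to the two accumulators, with closed base cases for one- and two-digit (and nonpositive) inputs; no counter, no lag, half the iterations.
import Mathlib
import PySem

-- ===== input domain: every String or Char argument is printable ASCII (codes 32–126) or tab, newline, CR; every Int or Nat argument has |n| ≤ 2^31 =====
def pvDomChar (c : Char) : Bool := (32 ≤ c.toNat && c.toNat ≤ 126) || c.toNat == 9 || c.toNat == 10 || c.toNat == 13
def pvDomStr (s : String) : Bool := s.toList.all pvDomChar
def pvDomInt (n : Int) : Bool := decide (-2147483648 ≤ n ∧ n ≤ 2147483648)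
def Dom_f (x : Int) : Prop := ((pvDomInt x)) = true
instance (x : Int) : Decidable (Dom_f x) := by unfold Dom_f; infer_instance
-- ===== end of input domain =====

-- B replaces A's streaming loop (counter i, one-step-lag accumulator c) by a direct
-- recursion that strips two decimal digits per step; same return value (alternative decomposition).

-- ===== PORT A =====
-- the while loop of A, state (x, a, b, i, c)
def fLoop (x a b i c : Int) : Int × Int :=
  if _h : x > 0 then
    let i' := i + 1
    let ab := if PySem.Int.mod i' 2 = 0 then (a + c, b) else (a, b + c)
    fLoop (PySem.Int.floordiv x 10) ab.1 ab.2 i' (PySem.Int.mod x 10)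
  else (a, b)
termination_by x.toNat
decreasing_by
  rw [PySem.Int.floordiv_eq_ediv_of_pos (by norm_num : (0:Int) < 10)]
  omega

def f (x : Int) : Int × Int := fLoop x 0 0 0 0

-- ===== PORT B =====
def f_alt (x : Int) : Int × Int :=
  if x < 10 then (0, 0)
  else if x < 100 then (PySem.Int.mod x 10, 0)
  else
    let ab := f_alt (PySem.Int.floordiv x 100)
    (ab.1 + PySem.Int.mod x 10, ab.2 + PySem.Int.mod (PySem.Int.floordiv x 10) 10)
termination_by x.toNat
decreasing_by
  rw [PySem.Int.floordiv_eq_ediv_of_pos (by norm_num : (0:Int) < 100)]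
  omega

-- ===== PRECONDITION & SPEC =====
def Spec_f (x : Int) (out : Int × Int) : Prop := out = f_alt x
instance (x : Int) (out : Int × Int) : Decidable (Spec_f x out) := by unfold Spec_f; infer_instance

-- ===== CLAIM (what is proved, stated in full; the proofs are below) =====
def Claim_equal_f : Prop := ∀ (x : Int), Dom_f x → Spec_f x (f x)

-- ===== LEMMAS AND PROOFS =====

lemma f_alt_nonpos (x : Int) (h : x < 10) : f_alt x = (0, 0) := by
  rw [f_alt]; simp [h]

lemma f_alt_two (x : Int) (h1 : 10 ≤ x) (h2 : x < 100) :
    f_alt x = (x % 10, 0) := by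
  rw [f_alt]
  simp [show ¬ x < 10 by omega, h2]

lemma f_alt_big (x : Int) (h : 100 ≤ x) :
    f_alt x = ((f_alt (x / 100)).1 + x % 10, (f_alt (x / 100)).2 + x / 10 % 10) := by
  rw [f_alt]
  simp [show ¬ x < 10 by omega, show ¬ x < 100 by omega]

-- invariant of A's loop at an even step counter: the pending digit c is still owed to b
lemma fLoop_eq_aux : ∀ (n : Nat) (x : Int), x.toNat = n → ∀ (a b i c : Int),
    i % 2 = 0 → 0 < x →
    fLoop x a b i c = (a + (f_alt x).1, b + c + (f_alt x).2) := by
  intro n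
  induction n using Nat.strong_induction_on with
  | _ n ih =>
    intro x hxn a b i c hi hx
    have hm10 : ∀ a : Int, PySem.Int.mod a 10 = a % 10 :=
      fun a => PySem.Int.mod_eq_emod_of_pos (by norm_num)
    have hd10 : ∀ a : Int, PySem.Int.floordiv a 10 = a / 10 :=
      fun a => PySem.Int.floordiv_eq_ediv_of_pos (by norm_num)
    have hm2 : ∀ a : Int, PySem.Int.mod a 2 = a % 2 :=
      fun a => PySem.Int.mod_eq_emod_of_pos (by norm_num)
    rw [fLoop]
    simp only [hx, dif_pos, hm10, hd10, hm2]
    rw [if_neg (by omega : ¬ (i + 1) % 2 = 0)]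
    by_cases h1 : x < 10
    · -- one digit: x / 10 = 0, the inner call returns at once
      rw [fLoop]
      simp only [show ¬ x / 10 > 0 by omega, dif_neg, not_false_iff]
      rw [f_alt_nonpos x h1]
      simp
    · -- unroll a second iteration
      rw [fLoop]
      simp only [show x / 10 > 0 by omega, dif_pos, hm10, hd10, hm2]
      rw [if_pos (by omega : (i + 1 + 1) % 2 = 0)]
      have hdd : x / 10 / 10 = x / 100 := by
        have := Int.ediv_ediv_of_nonneg (x := x) (y := 10) (z := 10) (by norm_num)
        simpa using this
      by_cases h2 : x < 100
      · -- two digits: x / 100 = 0, the innermost call returns at once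
        rw [fLoop]
        simp only [hdd, show ¬ x / 100 > 0 by omega, dif_neg, not_false_iff]
        rw [f_alt_two x (by omega) h2]
        simp
      · -- three or more digits: apply the induction hypothesis at x / 100
        rw [hdd]
        have hlt : (x / 100).toNat < n := by omega
        rw [ih (x / 100).toNat hlt (x / 100) rfl _ _ _ _ (by omega) (by omega)]
        rw [f_alt_big x (by omega)]
        simp only [Prod.mk.injEq]
        constructor <;> ring

-- ===== VERDICT (by name: the statement is the Claim_ definition above) =====
theorem f_spec : Claim_equal_f := by
  intro x _
  unfold Spec_f f
  by_cases hx : 0 < x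
  · rw [fLoop_eq_aux x.toNat x rfl 0 0 0 0 (by norm_num) hx]
    simp
  · rw [fLoop]
    simp only [hx, dif_neg, not_false_iff]
    rw [f_alt_nonpos x (by omega)]
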